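-- pv_equiv track=rewrite | github.com/ChiHyeongCho/Algorithms | venv/Algorithm Problems/네이버 1번.py | solution
-- ===== SOURCE A (Python) =====
-- def solution(boxes):
--
--     number = [0]*(1000001)
--     answer = 0
--
--     for i in range(len(boxes)):
--
--         number[boxes[i][0]] += 1
--         number[boxes[i][1]] += 1
--
--     for i in range(len(number)):
--
--         if number[i]%2 == 1 and number[i] > 0 :
--             answer += 1
--
--     return answer//2
-- ===== SOURCE B (Python) =====
-- def solution(boxes):
--     # One pass maintaining the set of endpoint values seen an odd number of times.
--     odd = set()
--     for box in boxes:
--         for e in (box[0], box[1]):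
--             if e in odd:
--                 odd.discard(e)
--             else:
--                 odd.add(e)
--     return len(odd) // 2
-- ===== Notes on version B (the rewrite author's own statement) =====
-- stated objective: simpler
-- what changed: Replaces the fixed 1000001-slot count array plus a second full scan over all 1000001 slots with a single pass over the boxes that toggles each endpoint value in a parity set, returning len(set)//2.
-- outside the precondition, e.g. on solution([[-1, 1000000]]): A returns 0, B returns 1
import Mathlib
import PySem

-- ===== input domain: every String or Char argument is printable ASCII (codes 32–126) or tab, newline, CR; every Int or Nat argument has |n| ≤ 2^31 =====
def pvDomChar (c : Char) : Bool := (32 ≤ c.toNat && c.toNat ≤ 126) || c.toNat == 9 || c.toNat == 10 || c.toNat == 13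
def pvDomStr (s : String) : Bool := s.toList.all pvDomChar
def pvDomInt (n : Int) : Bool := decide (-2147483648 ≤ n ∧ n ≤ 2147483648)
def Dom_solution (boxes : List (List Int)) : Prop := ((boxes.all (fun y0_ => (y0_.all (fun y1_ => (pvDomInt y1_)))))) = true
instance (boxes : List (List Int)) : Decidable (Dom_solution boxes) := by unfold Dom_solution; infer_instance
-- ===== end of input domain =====

-- B drops A's fixed 1000001-slot count array and its full second scan, instead toggling each endpoint
-- value in a parity set in one pass over the boxes (objective: simpler).

-- ===== PORT A =====
-- Python-list indexing / item assignment on an Array carrier (exact: the same index resolution,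
-- PySem.List.pyIdx?, as PySem's pyGetD/pySetD; an Array is used so evaluation of the 1000001-slot
-- count array is constant-time per access, as in Python)
def pvArrGetD (xs : Array Int) (i : Int) : Int :=
  match PySem.List.pyIdx? xs.size i with
  | some k => xs.getD k 0
  | none => 0
def pvArrSetD (xs : Array Int) (i : Int) (v : Int) : Array Int :=
  match PySem.List.pyIdx? xs.size i with
  | some k => xs.setIfInBounds k v
  | none => xs

def solution (boxes : List (List Int)) : Int :=
  let number : Array Int := Array.replicate 1000001 0
  let number := (PySem.List.pyRange 0 (boxes.length : Int) 1).foldl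
    (fun num i =>
      let num := pvArrSetD num (PySem.List.pyGetD (PySem.List.pyGetD boxes i []) 0 0)
        (pvArrGetD num (PySem.List.pyGetD (PySem.List.pyGetD boxes i []) 0 0) + 1)
      pvArrSetD num (PySem.List.pyGetD (PySem.List.pyGetD boxes i []) 1 0)
        (pvArrGetD num (PySem.List.pyGetD (PySem.List.pyGetD boxes i []) 1 0) + 1))
    number
  let answer := (PySem.List.pyRange 0 (number.size : Int) 1).foldl
    (fun a i =>
      if PySem.Int.mod (pvArrGetD number i) 2 = 1 ∧ pvArrGetD number i > 0
      then a + 1 else a)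
    (0 : Int)
  PySem.Int.floordiv answer 2

-- ===== PORT B =====
def pvToggle (s : PySem.Set Int) (e : Int) : PySem.Set Int :=
  if e ∈ s then PySem.Set.discard s e else PySem.Set.add s e

def solution_alt (boxes : List (List Int)) : Int :=
  let odd : PySem.Set Int := boxes.foldl
    (fun s box => pvToggle (pvToggle s (PySem.List.pyGetD box 0 0)) (PySem.List.pyGetD box 1 0))
    PySem.Set.empty
  PySem.Int.floordiv (PySem.Set.len odd) 2

-- ===== PRECONDITION & SPEC =====
def pvE0 (b : List Int) : Int := PySem.List.pyGetD b 0 0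
def pvE1 (b : List Int) : Int := PySem.List.pyGetD b 1 0
def pvEps (boxes : List (List Int)) : List Int := boxes.flatMap (fun b => [pvE0 b, pvE1 b])

-- Pre_ excludes (a) inputs on which A raises IndexError — a box with fewer than two entries, or an
-- endpoint outside -1000001..1000000 — and (b) inputs carrying two DISTINCT endpoint values congruent
-- mod 1000001 (possible only with negative coordinates, outside the problem's coordinate domain),
-- where A's negative-index wraparound conflates the two values in one array slot.
def Pre_solution (boxes : List (List Int)) : Prop :=
  (∀ b ∈ boxes, 2 ≤ b.length ∧ -1000001 ≤ pvE0 b ∧ pvE0 b ≤ 1000000 ∧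
      -1000001 ≤ pvE1 b ∧ pvE1 b ≤ 1000000) ∧
  (∀ v ∈ pvEps boxes, ∀ w ∈ pvEps boxes, v % 1000001 = w % 1000001 → v = w)
instance (boxes : List (List Int)) : Decidable (Pre_solution boxes) := by
  unfold Pre_solution; infer_instance

def pvWitness_solution : List (List Int) := [[1, 2], [1, 3], [-5, 2]]

def Spec_solution (boxes : List (List Int)) (out : Int) : Prop := out = solution_alt boxes
instance (boxes : List (List Int)) (out : Int) : Decidable (Spec_solution boxes out) := by unfold Spec_solution; infer_instance

-- ===== CLAIM (what is proved, stated in full; the proofs are below) =====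
def Claim_equal_solution : Prop := ∀ (boxes : List (List Int)), Dom_solution boxes → Pre_solution boxes → Spec_solution boxes (solution boxes)

-- ===== LEMMAS AND PROOFS =====

-- one 'number[e] += 1' on the count array
def pvInc (num : List Int) (e : Int) : List Int :=
  PySem.List.pySetD num e (PySem.List.pyGetD num e 0 + 1)

-- A's per-box loop body (two += steps)
def pvFA : List Int → List Int → List Int := fun num b => pvInc (pvInc num (pvE0 b)) (pvE1 b)

-- A's second loop as a function of the filled count array
def pvLoop2 (num : List Int) : Int :=
  (PySem.List.pyRange 0 (num.length : Int) 1).foldl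
    (fun a i =>
      if PySem.Int.mod (PySem.List.pyGetD num i 0) 2 = 1 ∧ PySem.List.pyGetD num i 0 > 0
      then a + 1 else a) 0

-- array-side analogues of A's loop bodies
def pvIncA (num : Array Int) (e : Int) : Array Int :=
  pvArrSetD num e (pvArrGetD num e + 1)
def pvFAA : Array Int → List Int → Array Int := fun num b => pvIncA (pvIncA num (pvE0 b)) (pvE1 b)
def pvLoop2A (num : Array Int) : Int :=
  (PySem.List.pyRange 0 (num.size : Int) 1).foldl
    (fun a i =>
      if PySem.Int.mod (pvArrGetD num i) 2 = 1 ∧ pvArrGetD num i > 0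
      then a + 1 else a) 0

theorem pvArrGetD_toList (xs : Array Int) (i : Int) :
    pvArrGetD xs i = PySem.List.pyGetD xs.toList i 0 := by
  unfold pvArrGetD PySem.List.pyGetD PySem.List.pyGet?
  rw [Array.length_toList]
  cases h : PySem.List.pyIdx? xs.size i with
  | none => simp
  | some k =>
    simp only [Option.bind_some, Array.getD]
    split
    · next hk =>
        have hk' : k < xs.toList.length := by rw [Array.length_toList]; exact hk
        rw [List.getElem?_eq_getElem hk', Option.getD_some]
        exact (Array.getElem_toList hk).symm
    · next hk =>
        rw [List.getElem?_eq_none (by rw [Array.length_toList]; omega), Option.getD_none]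

theorem pvArrSetD_toList (xs : Array Int) (i : Int) (v : Int) :
    (pvArrSetD xs i v).toList = PySem.List.pySetD xs.toList i v := by
  unfold pvArrSetD PySem.List.pySetD PySem.List.pySet?
  rw [Array.length_toList]
  cases h : PySem.List.pyIdx? xs.size i with
  | none => simp
  | some k => simp [Array.toList_setIfInBounds]

theorem pvIncA_toList (num : Array Int) (e : Int) :
    (pvIncA num e).toList = pvInc num.toList e := by
  unfold pvIncA pvInc
  rw [pvArrSetD_toList, pvArrGetD_toList]

theorem pvFoldlIncA_toList (l : List Int) (a : Array Int) :
    (l.foldl pvIncA a).toList = l.foldl pvInc a.toList := by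
  induction l generalizing a with
  | nil => rfl
  | cons e rest ih => rw [List.foldl_cons, List.foldl_cons, ih, pvIncA_toList]

theorem pvLoop2A_toList (num : Array Int) : pvLoop2A num = pvLoop2 num.toList := by
  unfold pvLoop2A pvLoop2
  rw [Array.length_toList]
  have hb : (fun (a : Int) (i : Int) =>
        if PySem.Int.mod (pvArrGetD num i) 2 = 1 ∧ pvArrGetD num i > 0 then a + 1 else a)
      = (fun (a : Int) (i : Int) =>
        if PySem.Int.mod (PySem.List.pyGetD num.toList i 0) 2 = 1 ∧
            PySem.List.pyGetD num.toList i 0 > 0 then a + 1 else a) := by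
    funext a i
    rw [pvArrGetD_toList]
  rw [hb]

-- a per-box fold doing two endpoint steps equals the fold over the flattened endpoint list
theorem pv_eps_fold {β : Type} (g : β → Int → β) (boxes : List (List Int)) (init : β) :
    boxes.foldl (fun s b => g (g s (pvE0 b)) (pvE1 b)) init = (pvEps boxes).foldl g init := by
  induction boxes generalizing init with
  | nil => rfl
  | cons b bs ih =>
    simp only [pvEps, List.flatMap_cons, List.foldl_cons, List.foldl_append, ih, pvEps]
    rfl

-- index resolution: Python's possibly-negative index into the 1000001-slot array is e mod 1000001
theorem pvIdx_spec (e : Int) (h1 : -1000001 ≤ e) (h2 : e ≤ 1000000) :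
    PySem.List.pyIdx? 1000001 e = some (e % 1000001).toNat := by
  unfold PySem.List.pyIdx?
  split_ifs with ha hb hc <;> (try congr 1) <;> omega

theorem pvInc_length (num : List Int) (e : Int) : (pvInc num e).length = num.length := by
  unfold pvInc PySem.List.pySetD PySem.List.pySet?
  cases h : PySem.List.pyIdx? num.length e <;> simp

theorem pvInc_getD (num : List Int) (e : Int) (hlen : num.length = 1000001)
    (h1 : -1000001 ≤ e) (h2 : e ≤ 1000000) (j : Nat) (hj : j < 1000001) :
    (pvInc num e).getD j 0 =
      num.getD j 0 + (if e % 1000001 = (j : Int) then 1 else 0) := by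
  have hk : (e % 1000001).toNat < num.length := by omega
  unfold pvInc PySem.List.pySetD PySem.List.pySet? PySem.List.pyGetD PySem.List.pyGet?
  rw [hlen, pvIdx_spec e h1 h2]
  simp only [Option.map_some, Option.getD_some, Option.bind]
  rw [List.getD_eq_getElem?_getD, List.getElem?_set]
  by_cases hej : (e % 1000001).toNat = j
  · have hjlen : j < num.length := by omega
    have he : e % 1000001 = (j : Int) := by omega
    simp [hej, hjlen, he, List.getD_eq_getElem?_getD]
  · have : ¬ (e % 1000001 = (j : Int)) := by omega
    simp [hej, this, List.getD_eq_getElem?_getD]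

-- the count array after the first loop: slot j holds the number of endpoints with residue j
theorem pvLoopA (l : List Int) (num : List Int) (hlen : num.length = 1000001)
    (hr : ∀ e ∈ l, -1000001 ≤ e ∧ e ≤ 1000000) :
    (l.foldl pvInc num).length = 1000001 ∧
    ∀ j : Nat, j < 1000001 →
      (l.foldl pvInc num).getD j 0 =
        num.getD j 0 + ((l.map (fun e => e % 1000001)).count (j : Int) : Int) := by
  induction l generalizing num with
  | nil => simp [hlen]
  | cons e rest ih =>
    have he := hr e (by simp)
    have hlen' : (pvInc num e).length = 1000001 := by rw [pvInc_length, hlen]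
    obtain ⟨hL, hP⟩ := ih (pvInc num e) hlen' (fun x hx => hr x (by simp [hx]))
    refine ⟨hL, fun j hj => ?_⟩
    rw [List.foldl_cons, hP j hj, pvInc_getD num e hlen he.1 he.2 j hj]
    simp only [List.map_cons, List.count_cons]
    by_cases hc : e % 1000001 = (j : Int)
    · simp [hc]; push_cast; ring
    · simp [hc, Ne.symm]

-- the parity set after B's loop: exactly the values with odd count so far, without duplicates
theorem pvBset_spec (l : List Int) :
    (l.foldl pvToggle PySem.Set.empty).Nodup ∧
    ∀ v, v ∈ l.foldl pvToggle PySem.Set.empty ↔ l.count v % 2 = 1 := by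
  induction l using List.reverseRecOn with
  | nil => simp [PySem.Set.empty]
  | append_singleton rest e ih =>
    obtain ⟨hn, hm⟩ := ih
    rw [List.foldl_append]
    simp only [List.foldl_cons, List.foldl_nil]
    rw [pvToggle]
    split_ifs with hmem
    · refine ⟨PySem.Set.nodup_discard _ _ hn, fun v => ?_⟩
      rw [PySem.Set.mem_discard]
      rw [hm] at hmem ⊢
      rw [List.count_append, List.count_singleton']
      by_cases hv : v = e
      · subst hv; simp; omega
      · simp [hv, Ne.symm hv]
    · refine ⟨PySem.Set.nodup_add _ _ hn, fun v => ?_⟩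
      rw [PySem.Set.mem_add]
      rw [hm] at hmem ⊢
      rw [List.count_append, List.count_singleton']
      by_cases hv : v = e
      · subst hv; simp; omega
      · simp [hv, Ne.symm hv]

-- accumulate-if loop is countP
theorem pv_foldl_if_count (p : Int → Prop) [DecidablePred p] (l : List Int) (a : Int) :
    l.foldl (fun acc x => if p x then acc + 1 else acc) a = a + (l.countP (fun x => decide (p x)) : Int) := by
  induction l generalizing a with
  | nil => simp
  | cons x xs ih =>
    simp only [List.foldl_cons, List.countP_cons, ih]
    by_cases h : p x <;> simp [h] <;> push_cast <;> ring

theorem pv_count_map (l : List Int) (f : Int → Int) (b : Int) :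
    (l.map f).count b = l.countP (fun a => f a == b) := by
  induction l with
  | nil => rfl
  | cons x xs ih => simp only [List.map_cons, List.count_cons, List.countP_cons, ih]

theorem pv_countP_range_card (n : Nat) (p : Nat → Bool) :
    (List.range n).countP p = ((Finset.range n).filter (fun j => p j)).card := by
  rw [List.countP_eq_length_filter]
  simp [Finset.range, Finset.filter, Multiset.range, Multiset.filter, Finset.card]

-- the residue-indexed odd slots are in bijection with the odd endpoint values (mod-injectivity)
theorem pv_card_bridge (eps : List Int)
    (hr : ∀ e ∈ eps, -1000001 ≤ e ∧ e ≤ 1000000)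
    (hinj : ∀ v ∈ eps, ∀ w ∈ eps, v % 1000001 = w % 1000001 → v = w) :
    ((Finset.range 1000001).filter
        (fun j : Nat => (eps.map (fun e => e % 1000001)).count ((j : Int)) % 2 = 1)).card =
      (eps.toFinset.filter (fun v => eps.count v % 2 = 1)).card := by
  have hcnt : ∀ v ∈ eps, (eps.map (fun e => e % 1000001)).count (v % 1000001) = eps.count v := by
    intro v hv
    rw [pv_count_map]
    unfold List.count
    apply List.countP_congr
    intro w hw
    simp only [beq_iff_eq]
    constructor
    · intro h; exact hinj w hw v hv h
    · intro h; rw [h]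
  symm
  apply Finset.card_bij (fun v _ => (v % 1000001).toNat)
  · intro v hv
    simp only [Finset.mem_filter, List.mem_toFinset] at hv
    obtain ⟨hmem, hodd⟩ := hv
    have hb := hr v hmem
    simp only [Finset.mem_filter, Finset.mem_range]
    constructor
    · omega
    · rw [Int.toNat_of_nonneg (by omega), hcnt v hmem]; exact hodd
  · intro v hv w hw h
    simp only [Finset.mem_filter, List.mem_toFinset] at hv hw
    have hbv := hr v hv.1; have hbw := hr w hw.1
    apply hinj v hv.1 w hw.1
    omega
  · intro j hj
    simp only [Finset.mem_filter, Finset.mem_range] at hj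
    obtain ⟨hjr, hodd⟩ := hj
    have hpos : 0 < (eps.map (fun e => e % 1000001)).count ((j : Int)) := by omega
    rw [List.count_pos_iff] at hpos
    obtain ⟨v, hv, hfv⟩ := List.mem_map.mp hpos
    refine ⟨v, ?_, ?_⟩
    · simp only [Finset.mem_filter, List.mem_toFinset]
      refine ⟨hv, ?_⟩
      have := hcnt v hv
      rw [hfv] at this
      omega
    · rw [hfv]; omega

theorem solution_spec' (boxes : List (List Int)) (h : Pre_solution boxes) :
    solution boxes = solution_alt boxes := by
  obtain ⟨hbox, hinj⟩ := h
  have hre : ∀ e ∈ pvEps boxes, -1000001 ≤ e ∧ e ≤ 1000000 := by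
    intro e he
    unfold pvEps at he
    rw [List.mem_flatMap] at he
    obtain ⟨b, hb, h'⟩ := he
    have := hbox b hb
    simp only [List.mem_cons, List.not_mem_nil, or_false] at h'
    rcases h' with h' | h' <;> subst h' <;> exact ⟨by omega, by omega⟩
  set eps := pvEps boxes with heps
  set resids := eps.map (fun e => e % 1000001) with hresids
  -- A side: the first loop fills the residue count array
  have h0 : solution boxes = PySem.Int.floordiv
      (pvLoop2A ((PySem.List.pyRange 0 (boxes.length : Int) 1).foldl
        (fun num i => pvFAA num (PySem.List.pyGetD boxes i []))
        (Array.replicate 1000001 0))) 2 := rfl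
  have h1 : (PySem.List.pyRange 0 (boxes.length : Int) 1).foldl
        (fun num i => pvFAA num (PySem.List.pyGetD boxes i []))
        (Array.replicate 1000001 0)
      = boxes.foldl pvFAA (Array.replicate 1000001 0) :=
    PySem.List.foldl_pyRange_zero_pyGetD' boxes [] pvFAA _
  have h2 : boxes.foldl pvFAA (Array.replicate 1000001 0) = eps.foldl pvIncA (Array.replicate 1000001 0) :=
    pv_eps_fold pvIncA boxes _
  have h2b : (eps.foldl pvIncA (Array.replicate 1000001 0)).toList
      = eps.foldl pvInc (List.replicate 1000001 0) := by
    rw [pvFoldlIncA_toList, Array.toList_replicate]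
  rw [h1, h2, pvLoop2A_toList, h2b] at h0
  set NUM := eps.foldl pvInc (List.replicate 1000001 0) with hNUM
  obtain ⟨hNlen, hNget⟩ := pvLoopA eps (List.replicate 1000001 0) (List.length_replicate) hre
  have hNval : ∀ j : Nat, j < 1000001 → NUM.getD j 0 = ((resids.count (j : Int) : Nat) : Int) := by
    intro j hj
    rw [hNget j hj, List.getD_replicate _ hj, zero_add]
  -- A side: the second loop counts the odd slots
  have h3 : pvLoop2 NUM = NUM.foldl
      (fun a x => if PySem.Int.mod x 2 = 1 ∧ x > 0 then a + 1 else a) 0 :=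
    PySem.List.foldl_pyRange_zero_pyGetD' NUM 0
      (fun a x => if PySem.Int.mod x 2 = 1 ∧ x > 0 then a + 1 else a) 0
  have h4 : NUM.foldl (fun a x => if PySem.Int.mod x 2 = 1 ∧ x > 0 then a + 1 else a) 0
      = 0 + (NUM.countP (fun x => decide (PySem.Int.mod x 2 = 1 ∧ x > 0)) : Int) :=
    pv_foldl_if_count _ NUM 0
  have hNUMeq : NUM = (List.range 1000001).map (fun j : Nat => ((resids.count ((j : Int)) : Nat) : Int)) := by
    apply List.ext_getElem
    · rw [hNlen, List.length_map, List.length_range]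
    · intro i h₁ h₂
      have hi : i < 1000001 := by rw [hNlen] at h₁; exact h₁
      have := hNval i hi
      rw [List.getD_eq_getElem NUM 0 h₁] at this
      simp only [List.getElem_map, List.getElem_range]
      exact this
  have h5 : NUM.countP (fun x => decide (PySem.Int.mod x 2 = 1 ∧ x > 0))
      = (List.range 1000001).countP (fun j : Nat => decide ((resids.count ((j : Int))) % 2 = 1)) := by
    rw [hNUMeq, List.countP_map]
    apply List.countP_congr
    intro j _
    simp only [Function.comp_apply, decide_eq_true_eq]
    rw [PySem.Int.mod_eq_emod_of_pos (by omega)]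
    constructor
    · rintro ⟨ha, hb⟩
      omega
    · intro hodd
      constructor <;> omega
  -- B side: the parity set holds exactly the odd endpoint values
  have hb0 : solution_alt boxes = PySem.Int.floordiv
      ((boxes.foldl (fun s box => pvToggle (pvToggle s (PySem.List.pyGetD box 0 0))
          (PySem.List.pyGetD box 1 0)) PySem.Set.empty).length : Int) 2 := rfl
  have hb1 : boxes.foldl (fun s box => pvToggle (pvToggle s (PySem.List.pyGetD box 0 0))
          (PySem.List.pyGetD box 1 0)) PySem.Set.empty = eps.foldl pvToggle PySem.Set.empty :=
    pv_eps_fold pvToggle boxes _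
  rw [hb1] at hb0
  obtain ⟨hBnodup, hBmem⟩ := pvBset_spec eps
  set BS := eps.foldl pvToggle PySem.Set.empty with hBS
  have hBcard : BS.length = (eps.toFinset.filter (fun v => eps.count v % 2 = 1)).card := by
    rw [← List.toFinset_card_of_nodup hBnodup]
    congr 1
    ext v
    simp only [List.mem_toFinset, Finset.mem_filter]
    rw [hBmem v]
    constructor
    · intro hodd
      refine ⟨?_, hodd⟩
      have : 0 < eps.count v := by omega
      exact List.count_pos_iff.mp this
    · intro hv; exact hv.2
  -- combine
  rw [h0, h3, h4, h5, hb0, hBcard]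
  rw [pv_countP_range_card 1000001 (fun j : Nat => decide ((resids.count ((j : Int))) % 2 = 1))]
  simp only [decide_eq_true_eq]
  rw [hresids, pv_card_bridge eps hre hinj, zero_add]

-- ===== VERDICT (by name: the statement is the Claim_ definition above) =====
theorem solution_spec : Claim_equal_solution := by
  intro boxes _ hpre
  exact solution_spec' boxes hpre
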